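-- pv_equiv track=rewrite | github.com/LalitGsk/Programming-Exercieses | Hackerrank/alternatingSort.py | alternatingSort
-- ===== SOURCE A (Python) =====
-- import math
--
-- def alternatingSort(a):
-- 	b=[0]*len(a)
-- 	b[0] =a[0]
-- 	b[1] = a[-1]
--
-- 	for i in range(2,len(a)):
-- 		if i%2!=0:
-- 			b[i]=a[-math.ceil(i/2)]
-- 		else:
-- 			b[i]=a[int(i/2)]
--
-- 	return sorted(set(b)) == b
-- ===== SOURCE B (Python) =====
-- def alternatingSort(a):
--     n = len(a)
--     prev = a[0]
--     lo, hi = 1, n - 1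
--     take_hi = True
--     for _ in range(n - 1):
--         cur = a[hi] if take_hi else a[lo]
--         if cur <= prev:
--             return False
--         prev = cur
--         if take_hi:
--             hi -= 1
--         else:
--             lo += 1
--         take_hi = not take_hi
--     return True
-- ===== Notes on version B (the rewrite author's own statement) =====
-- stated objective: faster
-- what changed: Instead of materialising the interleaved array b and comparing it with sorted(set(b)) (an O(n log n) sort plus hashing), B walks the list once with two pointers (front/back, alternating) and checks strict increase directly, returning False at the first violation.
import Mathlib
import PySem

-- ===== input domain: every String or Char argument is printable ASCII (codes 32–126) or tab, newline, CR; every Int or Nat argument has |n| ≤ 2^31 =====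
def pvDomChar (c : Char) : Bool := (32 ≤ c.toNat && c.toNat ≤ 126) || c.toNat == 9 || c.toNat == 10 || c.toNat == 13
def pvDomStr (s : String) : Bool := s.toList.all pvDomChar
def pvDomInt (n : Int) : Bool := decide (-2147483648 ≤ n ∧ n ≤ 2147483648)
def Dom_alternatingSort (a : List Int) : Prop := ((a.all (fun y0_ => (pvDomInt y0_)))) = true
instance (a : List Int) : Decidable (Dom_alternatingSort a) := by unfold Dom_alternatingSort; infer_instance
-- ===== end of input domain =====

-- B replaces A's interleaved-array build + sorted(set(..)) == comparison by a single two-pointer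
-- scan checking strict increase (objective: faster).

-- ===== PORT A =====
-- a[i]; always in range where A's indexing succeeds (Pre_ excludes the raising inputs), so getD 0 is never the value Python produced
def pvAget (a : List Int) (i : Int) : Int := (PySem.List.pyGet? a i).getD 0

def alternatingSort (a : List Int) : Bool :=
  -- b = [0]*len(a); b[0] = a[0]; b[1] = a[-1]   (raises IndexError when len(a) < 2: outside Pre_)
  let b0 := ((List.replicate a.length (0 : Int)).set 0 (pvAget a 0)).set 1 (pvAget a (-1))
  -- for i in range(2, len(a)): …   (for i ≥ 2: math.ceil(i/2) = (i+1)//2 and int(i/2) = i//2, exactly;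
  -- b[i] = … with 2 ≤ i < len(b), so List.set at i.toNat is exact)
  let b := (PySem.List.pyRange 2 (a.length : Int) 1).foldl
    (fun b i =>
      if PySem.Int.mod i 2 ≠ 0 then
        b.set i.toNat (pvAget a (-(PySem.Int.floordiv (i + 1) 2)))
      else
        b.set i.toNat (pvAget a (PySem.Int.floordiv i 2))) b0
  -- return sorted(set(b)) == b
  decide (PySem.List.sorted (PySem.Set.ofList b) (fun x => x) false = b)

-- ===== PORT B =====
-- the for-loop of Source B: k iterations left, state (prev, lo, hi, take_hi); `return False` = the false branch
def altGo (a : List Int) : Nat → Int → Int → Int → Bool → Bool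
  | 0, _, _, _, _ => true
  | k + 1, prev, lo, hi, takeHi =>
    let cur := if takeHi then pvAget a hi else pvAget a lo
    if cur ≤ prev then false
    else altGo a k cur (if takeHi then lo else lo + 1) (if takeHi then hi - 1 else hi) (!takeHi)

def alternatingSort_alt (a : List Int) : Bool :=
  altGo a (a.length - 1) (pvAget a 0) 1 ((a.length : Int) - 1) true

-- ===== PRECONDITION & SPEC =====
-- Pre_ excludes lists of length < 2, on which A raises IndexError (b[0] = a[0] on [], b[1] = a[-1] on singletons).
def Pre_alternatingSort (a : List Int) : Prop := 2 ≤ a.length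
instance (a : List Int) : Decidable (Pre_alternatingSort a) := by unfold Pre_alternatingSort; infer_instance
def pvWitness_alternatingSort : List Int := [1, 3, 2]

def Spec_alternatingSort (a : List Int) (out : Bool) : Prop := out = alternatingSort_alt a
instance (a : List Int) (out : Bool) : Decidable (Spec_alternatingSort a out) := by unfold Spec_alternatingSort; infer_instance

-- ===== CLAIM (what is proved, stated in full; the proofs are below) =====
def Claim_equal_alternatingSort : Prop := ∀ (a : List Int), Dom_alternatingSort a → Pre_alternatingSort a → Spec_alternatingSort a (alternatingSort a)

-- ===== LEMMAS AND PROOFS =====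

-- index read at position j of the interleaved sequence: a[j/2] for even j, a[n - (j+1)/2] for odd j
def pvIdx (n j : Nat) : Int := if j % 2 = 0 then ((j / 2 : Nat) : Int) else (n : Int) - (((j + 1) / 2 : Nat) : Int)

-- the interleaved list a[0], a[n-1], a[1], a[n-2], … both programs are about
def pvM (a : List Int) : List Int := (List.range a.length).map (fun j => pvAget a (pvIdx a.length j))

-- the values B's scan visits after its first element
def pvWalk (a : List Int) : Nat → Int → Int → Bool → List Int
  | 0, _, _, _ => []
  | k + 1, lo, hi, takeHi =>
    (if takeHi then pvAget a hi else pvAget a lo) ::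
      pvWalk a k (if takeHi then lo else lo + 1) (if takeHi then hi - 1 else hi) (!takeHi)

-- the value A's loop writes at index i
def pvW (a : List Int) (i : Int) : Int :=
  if PySem.Int.mod i 2 ≠ 0 then pvAget a (-(PySem.Int.floordiv (i + 1) 2))
  else pvAget a (PySem.Int.floordiv i 2)

lemma sorted_set_eq_iff (L : List Int) :
    (PySem.List.sorted (PySem.Set.ofList L) (fun x => x) false = L) ↔ L.Pairwise (· < ·) := by
  constructor
  · intro h
    have := PySem.List.sorted_ofList_pairwise_lt (xs := L)
    rwa [h] at this
  · intro hp
    have hnd : L.Nodup := hp.imp (fun h => ne_of_lt h)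
    have hperm : L.Perm (PySem.Set.ofList L) :=
      List.Perm.of_eq (PySem.Set.ofList_eq_self_of_nodup L hnd).symm
    exact PySem.List.sorted_eq_of_perm_of_pairwise_lt _ _ _ hperm hp

lemma altGo_eq (a : List Int) : ∀ (k : Nat) (prev lo hi : Int) (th : Bool),
    altGo a k prev lo hi th = decide (List.IsChain (· < ·) (prev :: pvWalk a k lo hi th)) := by
  intro k
  induction k with
  | zero => intro prev lo hi th; simp [altGo, pvWalk]
  | succ k ih =>
    intro prev lo hi th
    rw [altGo, pvWalk]
    simp only [List.isChain_cons_cons]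
    by_cases h : (if th then pvAget a hi else pvAget a lo) ≤ prev
    · simp [h, not_lt.mpr h]
    · rw [if_neg h, ih]
      simp [not_le.mp h]

lemma pvWalk_eq (a : List Int) : ∀ (k : Nat) (lo hi : Int),
    (pvWalk a k lo hi true
      = (List.range k).map (fun t => if t % 2 = 0 then pvAget a (hi - (t / 2 : Nat)) else pvAget a (lo + (t / 2 : Nat))))
    ∧ (pvWalk a k lo hi false
      = (List.range k).map (fun t => if t % 2 = 0 then pvAget a (lo + (t / 2 : Nat)) else pvAget a (hi - (t / 2 : Nat)))) := by
  intro k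
  induction k with
  | zero => intro lo hi; simp [pvWalk]
  | succ k ih =>
    intro lo hi
    rw [List.range_succ_eq_map]
    constructor
    · rw [pvWalk]
      simp only [if_true, List.map_cons, List.map_map]
      rw [List.cons_eq_cons]
      refine ⟨by simp, ?_⟩
      rw [show (!true) = false from Bool.not_true, (ih lo (hi - 1)).2]
      apply List.map_congr_left
      intro t _
      simp only [Function.comp]
      rcases Nat.even_or_odd t with ht | ht
      · have h1 : t % 2 = 0 := Nat.even_iff.mp ht
        have h2 : (t + 1) % 2 ≠ 0 := by have := Nat.even_iff.mp ht; omega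
        have h3 : (t + 1) / 2 = t / 2 := by have := Nat.even_iff.mp ht; omega
        simp [h1, h2, h3]
      · have h1 : t % 2 ≠ 0 := by simpa using Nat.odd_iff.mp ht
        have h2 : (t + 1) % 2 = 0 := by have := Nat.odd_iff.mp ht; omega
        have h3 : (t + 1) / 2 = t / 2 + 1 := by have := Nat.odd_iff.mp ht; omega
        simp only [if_neg h1, if_pos h2, h3]
        congr 1
        push_cast
        ring
    · rw [pvWalk]
      simp only [Bool.false_eq_true, if_false, List.map_cons, List.map_map]
      rw [List.cons_eq_cons]
      refine ⟨by simp, ?_⟩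
      rw [show (!false) = true from Bool.not_false, (ih (lo + 1) hi).1]
      apply List.map_congr_left
      intro t _
      simp only [Function.comp]
      rcases Nat.even_or_odd t with ht | ht
      · have h1 : t % 2 = 0 := Nat.even_iff.mp ht
        have h2 : (t + 1) % 2 ≠ 0 := by have := Nat.even_iff.mp ht; omega
        have h3 : (t + 1) / 2 = t / 2 := by have := Nat.even_iff.mp ht; omega
        simp [h1, h2, h3]
      · have h1 : t % 2 ≠ 0 := by simpa using Nat.odd_iff.mp ht
        have h2 : (t + 1) % 2 = 0 := by have := Nat.odd_iff.mp ht; omega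
        have h3 : (t + 1) / 2 = t / 2 + 1 := by have := Nat.odd_iff.mp ht; omega
        simp only [if_neg h1, if_pos h2, h3]
        congr 1
        push_cast
        ring

lemma alt_eq_chain (a : List Int) (h : 1 ≤ a.length) :
    alternatingSort_alt a = decide (List.IsChain (· < ·) (pvM a)) := by
  obtain ⟨m, hm⟩ : ∃ m, a.length = m + 1 := ⟨a.length - 1, by omega⟩
  have hl : pvM a = pvAget a 0 :: pvWalk a (a.length - 1) 1 ((a.length : Int) - 1) true := by
    unfold pvM
    rw [hm, List.range_succ_eq_map, List.map_cons, List.map_map,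
        show (m + 1 - 1 : Nat) = m from rfl,
        show ((m + 1 : Nat) : Int) - 1 = (m : Int) by push_cast; ring,
        (pvWalk_eq a m 1 (m : Int)).1, List.cons_eq_cons]
    refine ⟨by simp [pvIdx], ?_⟩
    apply (List.map_congr_left ?_).symm
    intro t _
    simp only [Function.comp]
    by_cases h1 : t % 2 = 0
    · simp only [pvIdx, if_pos h1, if_neg (show ¬((t + 1) % 2 = 0) by omega)]
      congr 1
      omega
    · simp only [pvIdx, if_neg h1, if_pos (show (t + 1) % 2 = 0 by omega)]
      congr 1
      omega
  rw [hl]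
  unfold alternatingSort_alt
  rw [altGo_eq]

lemma foldl_set_length (v : Int → Int) : ∀ (l : List Int) (b0 : List Int),
    (l.foldl (fun b i => b.set i.toNat (v i)) b0).length = b0.length := by
  intro l
  induction l with
  | nil => intro b0; rfl
  | cons x l ih => intro b0; rw [List.foldl_cons, ih, List.length_set]

lemma foldl_set_get? (v : Int → Int) (n : Nat) (b0 : List Int) (j : Nat) :
    ((PySem.List.pyRange 2 (n : Int) 1).foldl (fun b i => b.set i.toNat (v i)) b0)[j]?
      = if 2 ≤ j ∧ j < n ∧ j < b0.length then some (v (j : Int)) else b0[j]? := by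
  induction n with
  | zero =>
    rw [PySem.List.pyRange_one_eq_nil (by norm_num)]
    simp
  | succ n ih =>
    by_cases hn : 2 ≤ n
    · rw [show ((n + 1 : Nat) : Int) = (n : Int) + 1 by push_cast; ring,
          PySem.List.pyRange_one_succ_right (by exact_mod_cast hn), List.foldl_append,
          List.foldl_cons, List.foldl_nil, show ((n : Int)).toNat = n from Int.toNat_natCast n,
          List.getElem?_set, foldl_set_length, ih]
      by_cases hj : n = j
      · subst hj
        by_cases hl : n < b0.length
        · simp [hl, hn]
        · simp [hl, hn]
      · rw [if_neg hj]
        by_cases hcond : 2 ≤ j ∧ j < n ∧ j < b0.length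
        · rw [if_pos hcond, if_pos (by omega)]
        · rw [if_neg hcond, if_neg (by omega : ¬(2 ≤ j ∧ j < n + 1 ∧ j < b0.length))]
    · rw [PySem.List.pyRange_one_eq_nil (by exact_mod_cast by omega : ((n + 1 : Nat) : Int) ≤ 2)]
      have h5 : ¬ (2 ≤ j ∧ j < n + 1 ∧ j < b0.length) := by omega
      rw [List.foldl_nil, if_neg h5]

lemma pvW_eq (a : List Int) (j : Nat) (hj2 : 2 ≤ j) (hjn : j < a.length) :
    pvW a (j : Int) = pvAget a (pvIdx a.length j) := by
  unfold pvW pvIdx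
  rw [PySem.Int.mod_eq_emod_of_pos (by norm_num), PySem.Int.floordiv_eq_ediv_of_pos (by norm_num),
      PySem.Int.floordiv_eq_ediv_of_pos (by norm_num)]
  by_cases h : j % 2 = 0
  · rw [if_neg (by omega : ¬((j : Int) % 2 ≠ 0)), if_pos h,
        show ((j : Int)) / 2 = ((j / 2 : Nat) : Int) by omega]
  · rw [if_pos (by omega : ((j : Int) % 2 ≠ 0)), if_neg h,
        show ((j : Int) + 1) / 2 = (((j + 1) / 2 : Nat) : Int) by omega]
    unfold pvAget
    rw [PySem.List.pyGet?_neg_natCast a ((j + 1) / 2) (by omega) (by omega),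
        show ((a.length : Int) - (((j + 1) / 2 : Nat) : Int)) = ((a.length - (j + 1) / 2 : Nat) : Int) by omega,
        PySem.List.pyGet?_natCast]

lemma a_eq_pairwise (a : List Int) (h : 2 ≤ a.length) :
    alternatingSort a = decide ((pvM a).Pairwise (· < ·)) := by
  have hstep : (fun (b : List Int) (i : Int) =>
      if PySem.Int.mod i 2 ≠ 0 then
        b.set i.toNat (pvAget a (-(PySem.Int.floordiv (i + 1) 2)))
      else
        b.set i.toNat (pvAget a (PySem.Int.floordiv i 2)))
      = (fun (b : List Int) (i : Int) => b.set i.toNat (pvW a i)) := by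
    funext b i
    unfold pvW
    split_ifs <;> rfl
  have hb : ((PySem.List.pyRange 2 (a.length : Int) 1).foldl
      (fun (b : List Int) (i : Int) =>
        if PySem.Int.mod i 2 ≠ 0 then
          b.set i.toNat (pvAget a (-(PySem.Int.floordiv (i + 1) 2)))
        else
          b.set i.toNat (pvAget a (PySem.Int.floordiv i 2)))
      (((List.replicate a.length (0 : Int)).set 0 (pvAget a 0)).set 1 (pvAget a (-1)))) = pvM a := by
    rw [hstep]
    apply List.ext_getElem?
    intro j
    rw [foldl_set_get? (pvW a) a.length]
    have hlen : (((List.replicate a.length (0 : Int)).set 0 (pvAget a 0)).set 1 (pvAget a (-1))).length = a.length := by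
      simp
    unfold pvM
    by_cases hjn : j < a.length
    · rw [List.getElem?_map, List.getElem?_range hjn]
      simp only [Option.map_some]
      by_cases hj2 : 2 ≤ j
      · rw [if_pos ⟨hj2, hjn, by omega⟩, pvW_eq a j hj2 hjn]
      · rw [if_neg (by omega)]
        interval_cases j
        · simp only [List.getElem?_set, List.length_set, List.length_replicate]
          rw [if_neg (by omega : ¬(1 = 0)), if_pos trivial, if_pos (by omega : 0 < a.length)]
          unfold pvIdx
          norm_num
        · simp only [List.getElem?_set, List.length_set, List.length_replicate]
          rw [if_pos trivial, if_pos (by omega : 1 < a.length)]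
          unfold pvIdx pvAget
          rw [if_neg (by omega : ¬(1 % 2 = 0))]
          rw [PySem.List.pyGet?_neg_ofNat a 1 (by omega) (by omega),
              show ((a.length : Int) - (((1 + 1) / 2 : Nat) : Int)) = ((a.length - 1 : Nat) : Int) by omega,
              PySem.List.pyGet?_natCast]
    · rw [if_neg (by omega), List.getElem?_eq_none (by rw [hlen]; omega),
          List.getElem?_eq_none (by simp; omega)]
  show decide (PySem.List.sorted (PySem.Set.ofList
      ((PySem.List.pyRange 2 (a.length : Int) 1).foldl
        (fun (b : List Int) (i : Int) =>
          if PySem.Int.mod i 2 ≠ 0 then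
            b.set i.toNat (pvAget a (-(PySem.Int.floordiv (i + 1) 2)))
          else
            b.set i.toNat (pvAget a (PySem.Int.floordiv i 2)))
        (((List.replicate a.length (0 : Int)).set 0 (pvAget a 0)).set 1 (pvAget a (-1)))))
      (fun x => x) false =
      ((PySem.List.pyRange 2 (a.length : Int) 1).foldl
        (fun (b : List Int) (i : Int) =>
          if PySem.Int.mod i 2 ≠ 0 then
            b.set i.toNat (pvAget a (-(PySem.Int.floordiv (i + 1) 2)))
          else
            b.set i.toNat (pvAget a (PySem.Int.floordiv i 2)))
        (((List.replicate a.length (0 : Int)).set 0 (pvAget a 0)).set 1 (pvAget a (-1)))))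
    = decide ((pvM a).Pairwise (· < ·))
  rw [hb, decide_eq_decide]
  exact sorted_set_eq_iff (pvM a)

-- ===== VERDICT (by name: the statement is the Claim_ definition above) =====
theorem alternatingSort_spec : Claim_equal_alternatingSort := by
  intro a _ hpre
  have h2 : 2 ≤ a.length := hpre
  unfold Spec_alternatingSort
  rw [a_eq_pairwise a h2, alt_eq_chain a (by omega)]
  exact (decide_eq_decide).mpr (List.isChain_iff_pairwise).symm
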